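-- pv_equiv track=rewrite | github.com/Soaicl-as/Arbitrage-Bot-2 | arbitrage-finder.py | find_matching_events
-- ===== SOURCE A (Python) =====
-- def find_matching_events(odds_data):
--     """Group events that match across different bookmakers"""
--     matched_events = {}
--
--     # Group by normalized event name
--     for item in odds_data:
--         event_key = f"{item['normalized_name']}_{item['market']}"
--         if event_key not in matched_events:
--             matched_events[event_key] = []
--         matched_events[event_key].append(item)
--
--     return matched_events
-- ===== SOURCE B (Python) =====
-- def find_matching_events(odds_data):
--     """Group events that match across different bookmakers"""
--     # two-pass: first collect the distinct composite keys in first-appearance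
--     # order, then build each group by filtering the whole list per key
--     keys = []
--     for item in odds_data:
--         k = f"{item['normalized_name']}_{item['market']}"
--         if k not in keys:
--             keys.append(k)
--     return {k: [item for item in odds_data
--                 if f"{item['normalized_name']}_{item['market']}" == k]
--             for k in keys}
-- ===== Notes on version B (the rewrite author's own statement) =====
-- stated objective: alternative
-- what changed: Replaces the single-pass dict-accumulation (create-empty-then-append per item) with a two-pass scheme: first collect the distinct composite keys in first-appearance order, then build each group with a per-key filter over the whole input.
import Mathlib
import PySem

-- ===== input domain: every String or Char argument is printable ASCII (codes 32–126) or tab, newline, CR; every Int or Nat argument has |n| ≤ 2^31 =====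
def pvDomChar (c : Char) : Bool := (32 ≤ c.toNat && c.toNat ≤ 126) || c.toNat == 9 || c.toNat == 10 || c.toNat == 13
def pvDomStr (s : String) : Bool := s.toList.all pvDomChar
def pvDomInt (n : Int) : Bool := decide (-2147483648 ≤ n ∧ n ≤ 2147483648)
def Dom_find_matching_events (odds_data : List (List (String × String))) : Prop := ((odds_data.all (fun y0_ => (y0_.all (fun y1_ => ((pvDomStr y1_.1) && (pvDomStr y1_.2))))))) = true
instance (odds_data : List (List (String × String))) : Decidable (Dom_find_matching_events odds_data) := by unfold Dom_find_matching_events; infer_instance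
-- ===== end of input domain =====

-- B groups by the same composite key in two passes (distinct keys, then one filter per key)
-- instead of A's one-pass dict accumulation; equivalence is proved on items with both keys present.

-- the composite key f"{item['normalized_name']}_{item['market']}" (first-match dict lookup;
-- under Pre_ both keys are present, so the getD "" default is never taken)
def pvKey (item : List (String × String)) : String :=
  ((PySem.Dict.mk item).get? "normalized_name").getD "" ++ "_" ++ ((PySem.Dict.mk item).get? "market").getD ""

-- ===== PORT A =====
def find_matching_events (odds_data : List (List (String × String))) : List (String × List (List (String × String))) :=
  (odds_data.foldl (fun matched_events item =>
      let event_key := pvKey item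
      let d1 := if matched_events.contains event_key then matched_events
                else matched_events.insert event_key ([] : List (List (String × String)))
      d1.insert event_key (d1.getD event_key [] ++ [item]))
    PySem.Dict.empty).items

-- ===== PORT B =====
def find_matching_events_alt (odds_data : List (List (String × String))) : List (String × List (List (String × String))) :=
  let keys := odds_data.foldl (fun ks item =>
      let k := pvKey item
      if k ∈ ks then ks else ks ++ [k]) ([] : List String)
  (keys.foldl (fun d k => d.insert k (odds_data.filter (fun it => pvKey it == k))) PySem.Dict.empty).items

-- ===== PRECONDITION & SPEC =====
-- Pre_ excludes exactly the inputs where the Python raises KeyError: an item missing the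
-- 'normalized_name' or 'market' key (both A and B raise there).
def Pre_find_matching_events (odds_data : List (List (String × String))) : Prop :=
  (odds_data.all (fun item => item.any (fun p => p.1 == "normalized_name") && item.any (fun p => p.1 == "market"))) = true
instance (odds_data : List (List (String × String))) : Decidable (Pre_find_matching_events odds_data) := by unfold Pre_find_matching_events; infer_instance

def pvWitness_find_matching_events : (List (List (String × String))) :=
  ([[("normalized_name", "team a vs team b"), ("market", "h2h")], [("normalized_name", "team a vs team b"), ("market", "h2h"), ("price", "2.1")]])

def Spec_find_matching_events (odds_data : List (List (String × String))) (out : List (String × List (List (String × String)))) : Prop := out = find_matching_events_alt odds_data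
instance (odds_data : List (List (String × String))) (out : List (String × List (List (String × String)))) : Decidable (Spec_find_matching_events odds_data out) := by unfold Spec_find_matching_events; infer_instance

-- ===== CLAIM (what is proved, stated in full; the proofs are below) =====
def Claim_equal_find_matching_events : Prop := ∀ (odds_data : List (List (String × String))), Dom_find_matching_events odds_data → Pre_find_matching_events odds_data → Spec_find_matching_events odds_data (find_matching_events odds_data)

-- ===== LEMMAS AND PROOFS =====

-- A's loop body is exactly dict-modify-append at the composite key
lemma stepA_eq_modify (d : PySem.Dict String (List (List (String × String)))) (item : List (String × String)) :
    (let event_key := pvKey item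
     let d1 := if d.contains event_key then d
               else d.insert event_key ([] : List (List (String × String)))
     d1.insert event_key (d1.getD event_key [] ++ [item]))
    = d.modify (pvKey item) [] (· ++ [item]) := by
  by_cases h : d.contains (pvKey item) = true <;>
    simp [h, PySem.Dict.modify, PySem.Dict.insert_insert_self, PySem.Dict.getD_of_not_contains]

-- both sides compute the canonical group table
lemma portA_canon (odds_data : List (List (String × String))) :
    find_matching_events odds_data
    = (PySem.Set.ofList (odds_data.map pvKey)).map
        (fun k => (k, odds_data.filter (fun it => pvKey it == k))) := by
  unfold find_matching_events
  have hfold : (fun (d : PySem.Dict String (List (List (String × String)))) item =>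
      (let event_key := pvKey item
       let d1 := if d.contains event_key then d
                 else d.insert event_key ([] : List (List (String × String)))
       d1.insert event_key (d1.getD event_key [] ++ [item])))
      = fun d item => d.modify (pvKey item) [] (· ++ [item]) := by
    funext d item; exact stepA_eq_modify d item
  rw [hfold]
  have hnd : (odds_data.foldl (fun d it => d.modify (pvKey it) ([] : List (List (String × String))) (· ++ [it])) PySem.Dict.empty).keys.Nodup :=
    PySem.Dict.nodup_keys_foldl_modify_key odds_data pvKey [] (fun _ it => (· ++ [it])) _ PySem.Dict.nodup_keys_empty
  rw [PySem.Dict.items_eq_map_keys _ hnd [], PySem.Dict.keys_foldl_modify_key]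
  simp only [PySem.Dict.keys_empty, PySem.Set.update_nil_left]
  apply List.map_congr_left
  intro k hk
  have h := PySem.Dict.getD_foldl_modify_append (l := odds_data.map (fun it => (pvKey it, it)))
    (d := PySem.Dict.empty) (c := k)
  rw [List.foldl_map] at h
  have : (odds_data.foldl (fun d it => d.modify (pvKey it) ([] : List (List (String × String))) (· ++ [it])) PySem.Dict.empty).getD k []
      = odds_data.filter (fun it => pvKey it == k) := by
    simpa [List.filter_map, Function.comp_def, List.map_map] using h
  rw [this]

lemma portB_canon (odds_data : List (List (String × String))) :
    find_matching_events_alt odds_data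
    = (PySem.Set.ofList (odds_data.map pvKey)).map
        (fun k => (k, odds_data.filter (fun it => pvKey it == k))) := by
  unfold find_matching_events_alt
  have hkeys : (odds_data.foldl (fun ks item =>
        let k := pvKey item
        if k ∈ ks then ks else ks ++ [k]) ([] : List String))
      = PySem.Set.ofList (odds_data.map pvKey) := by
    rw [← PySem.Set.update_nil_left, PySem.Set.update_map_eq_foldl_add]
    simp only [PySem.Set.add_eq_ite]
  rw [hkeys]
  have h := PySem.Dict.items_foldl_insert_fresh (l := PySem.Set.ofList (odds_data.map pvKey)) (k := id)
    (v := fun k => odds_data.filter (fun it => pvKey it == k)) (d := PySem.Dict.empty)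
    (by simp [PySem.Dict.contains_empty]) (by simp [PySem.Set.nodup_ofList (xs := odds_data.map pvKey)])
  simpa using h

-- ===== VERDICT (by name: the statement is the Claim_ definition above) =====
theorem find_matching_events_spec : Claim_equal_find_matching_events := by
  intro odds_data _ _
  unfold Spec_find_matching_events
  rw [portA_canon, portB_canon]
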